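-- pv_equiv track=rewrite | github.com/DineshPriyanthaGH/elevatehire-ai-platform | backend/candidates/cv_parser.py | parse_work_experience
-- ===== SOURCE A (Python) =====
-- from typing import Dict, List, Any, Optional
--
-- def parse_work_experience(experience_text: str) -> List[Dict[str, str]]:
--     """Parse work experience section"""
--     if not experience_text:
--         return []
--
--     # Simple parsing - can be enhanced
--     lines = [line.strip() for line in experience_text.split('\n') if line.strip()]
--     experience = []
--
--     current_job = {}
--     for line in lines:
--         # Look for job titles or companies
--         if any(word in line.lower() for word in ['engineer', 'manager', 'developer', 'analyst', 'specialist']):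
--             if current_job:
--                 experience.append(current_job)
--             current_job = {'position': line, 'company': '', 'duration': '', 'description': ''}
--         elif current_job:
--             if not current_job.get('company') and len(line.split()) <= 5:
--                 current_job['company'] = line
--             else:
--                 current_job['description'] += line + ' '
--
--     if current_job:
--         experience.append(current_job)
--
--     return experience
-- ===== SOURCE B (Python) =====
-- from typing import Dict, List
--
-- _TITLE_WORDS = ('engineer', 'manager', 'developer', 'analyst', 'specialist')
--
--
-- def _is_title(line: str) -> bool:
--     low = line.lower()
--     return any(w in low for w in _TITLE_WORDS)
--
--
-- def _record(block: List[str]) -> Dict[str, str]: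
--     position, rest = block[0], block[1:]
--     ci = next((i for i, l in enumerate(rest) if len(l.split()) <= 5), None)
--     company = rest[ci] if ci is not None else ''
--     description = ''.join(l + ' ' for i, l in enumerate(rest) if i != ci)
--     return {'position': position, 'company': company, 'duration': '', 'description': description}
--
--
-- def parse_work_experience(experience_text: str) -> List[Dict[str, str]]:
--     """Parse work experience section (block-partition version)."""
--     if not experience_text:
--         return []
--     lines = [line.strip() for line in experience_text.split('\n') if line.strip()]
--     # Partition into blocks, each starting at a title line; drop lines before the first title.
--     blocks: List[List[str]] = []
--     for line in lines:
--         if _is_title(line):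
--             blocks.append([line])
--         elif blocks:
--             blocks[-1].append(line)
--     return [_record(b) for b in blocks]
-- ===== Notes on version B (the rewrite author's own statement) =====
-- stated objective: alternative
-- what changed: Replaces A's single stateful loop that mutates an in-progress dict with a two-phase pipeline: first partition the cleaned lines into title-led blocks (dropping lines before the first title), then build each record from its block (company = first remaining line with <=5 words found by index, description = concatenation of the other lines).
import Mathlib
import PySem

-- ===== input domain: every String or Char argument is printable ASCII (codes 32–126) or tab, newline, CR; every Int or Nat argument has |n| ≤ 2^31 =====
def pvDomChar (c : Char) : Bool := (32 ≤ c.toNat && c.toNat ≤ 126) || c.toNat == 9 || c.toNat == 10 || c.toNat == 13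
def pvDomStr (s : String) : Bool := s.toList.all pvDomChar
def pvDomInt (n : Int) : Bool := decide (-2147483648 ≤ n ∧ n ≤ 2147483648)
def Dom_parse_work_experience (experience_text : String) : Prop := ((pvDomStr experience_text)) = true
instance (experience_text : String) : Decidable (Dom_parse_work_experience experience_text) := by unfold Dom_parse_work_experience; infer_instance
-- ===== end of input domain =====

-- B re-implements A's one stateful dict-mutating loop as a two-phase pipeline (partition lines
-- into title-led blocks, then build one record per block); objective: alternative decomposition,
-- same cost, proved to return exactly A's value.

-- shared line-level helpers (identical low-level tests in both Pythons)
def pvKeywords : List String := ["engineer", "manager", "developer", "analyst", "specialist"]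

-- any(word in line.lower() for word in [...])
def pvIsTitle (line : String) : Bool :=
  pvKeywords.any (fun w => PySem.Str.isIn w (PySem.Str.lower line))

-- len(line.split())
def pvWC (line : String) : Nat := (PySem.Str.split₀ line).length

-- [line.strip() for line in experience_text.split('\n') if line.strip()]
-- (split? with the literal separator "\n" ≠ "" is always `some`; getD [] is unreachable)
def pvCleanLines (t : String) : List String :=
  (((PySem.Str.split? t "\n").getD []).map PySem.Str.strip).filter (fun l => l != "")

-- ===== PORT A =====
-- current_job = {'position': line, 'company': '', 'duration': '', 'description': ''}
def pvNewJob (line : String) : PySem.Dict String String :=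
  PySem.Dict.mk [("position", line), ("company", ""), ("duration", ""), ("description", "")]

-- one iteration of A's for-loop; state = (experience as lists of dict items, current_job)
-- Python truthiness: 'if current_job' = items nonempty; 'not current_job.get('company')' is
-- true for both a missing key and the value '' — getD with default '' covers both.
def pvStepA (st : List (List (String × String)) × PySem.Dict String String) (line : String) :
    List (List (String × String)) × PySem.Dict String String :=
  if pvIsTitle line then
    ((if st.2.items.isEmpty then st.1 else st.1 ++ [st.2.items]), pvNewJob line)
  else if st.2.items.isEmpty then st
  else if PySem.Dict.getD st.2 "company" "" == "" && decide (pvWC line ≤ 5) then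
    (st.1, PySem.Dict.insert st.2 "company" line)
  else
    (st.1, PySem.Dict.insert st.2 "description"
      (PySem.Dict.getD st.2 "description" "" ++ line ++ " "))

def parse_work_experience (experience_text : String) : List (List (String × String)) :=
  if experience_text == "" then []
  else
    let lines := pvCleanLines experience_text
    let st := lines.foldl pvStepA ([], PySem.Dict.mk [])
    if st.2.items.isEmpty then st.1 else st.1 ++ [st.2.items]

-- ===== PORT B =====
-- ci = next((i for i, l in enumerate(rest) if len(l.split()) <= 5), None)
def pvCi (rest : List String) : Option Int :=
  ((PySem.List.enumerate rest).find? (fun p => decide (pvWC p.2 ≤ 5))).map (·.1)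

-- rest[ci] if ci is not None else ''   (ci, when present, is a valid index of rest)
def pvCompany (rest : List String) : String :=
  match pvCi rest with
  | some i => PySem.List.pyGetD rest i ""
  | none => ""

-- ''.join(l + ' ' for i, l in enumerate(rest) if i != ci)
def pvDesc (rest : List String) : String :=
  (((PySem.List.enumerate rest).filter (fun p => decide (some p.1 ≠ pvCi rest))).map (·.2)).foldl
    (fun s l => s ++ l ++ " ") ""

-- _record(block); block[0] via headD '' (every block built below is nonempty), block[1:] = drop 1
def pvRecord (block : List String) : List (String × String) :=
  [("position", block.headD ""), ("company", pvCompany (block.drop 1)),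
   ("duration", ""), ("description", pvDesc (block.drop 1))]

-- one iteration of B's partition loop: a title opens a new block, otherwise append to the last
def pvStepB (bs : List (List String)) (line : String) : List (List String) :=
  if pvIsTitle line then bs ++ [[line]]
  else if bs.isEmpty then bs
  else bs.dropLast ++ [(bs.getLast?.getD []) ++ [line]]

def parse_work_experience_alt (experience_text : String) : List (List (String × String)) :=
  if experience_text == "" then []
  else (((pvCleanLines experience_text).foldl pvStepB []).map pvRecord)

-- ===== PRECONDITION & SPEC =====
def Spec_parse_work_experience (experience_text : String) (out : List (List (String × String))) : Prop := out = parse_work_experience_alt experience_text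
instance (experience_text : String) (out : List (List (String × String))) : Decidable (Spec_parse_work_experience experience_text out) := by unfold Spec_parse_work_experience; infer_instance

-- ===== CLAIM (what is proved, stated in full; the proofs are below) =====
def Claim_equal_parse_work_experience : Prop := ∀ (experience_text : String), Dom_parse_work_experience experience_text → Spec_parse_work_experience experience_text (parse_work_experience experience_text)

-- ===== LEMMAS AND PROOFS =====

def pvGood (bs : List (List String)) : Prop :=
  ∀ b ∈ bs, b ≠ [] ∧ ∀ l ∈ b, l ≠ ""

def pvProj (bs : List (List String)) :
    List (List (String × String)) × PySem.Dict String String :=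
  match bs.getLast? with
  | none => ([], PySem.Dict.mk [])
  | some b => ((bs.dropLast).map pvRecord, PySem.Dict.mk (pvRecord b))

theorem pvNewJob_eq (line : String) : pvNewJob line = PySem.Dict.mk (pvRecord [line]) := rfl

theorem pvCi_some (rest : List String) (i : Int) (h : pvCi rest = some i) :
    ∃ (k : Nat) (hk : k < rest.length), i = (k : Int) ∧ pvCompany rest = rest[k] := by
  unfold pvCi at h
  obtain ⟨p, hp, rfl⟩ := Option.map_eq_some_iff.mp h
  have hmem := List.mem_of_find?_eq_some hp
  rw [PySem.List.mem_enumerate_iff] at hmem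
  obtain ⟨k, hk, rfl⟩ := hmem
  refine ⟨k, hk, by simp, ?_⟩
  have hci : pvCi rest = some (k : Int) := by
    unfold pvCi; rw [hp]; simp
  simp [pvCompany, hci, PySem.List.pyGetD_natCast, List.getD_eq_getElem?_getD, hk]

theorem pvCompany_none (rest : List String) (h : pvCi rest = none) : pvCompany rest = "" := by
  simp [pvCompany, h]

theorem pvCi_append_some (rest : List String) (line : String) (i : Int)
    (h : pvCi rest = some i) : pvCi (rest ++ [line]) = some i := by
  unfold pvCi at *
  rw [PySem.List.enumerate_append, List.find?_append]
  obtain ⟨p, hp, rfl⟩ := Option.map_eq_some_iff.mp h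
  rw [hp]; rfl

theorem pvCi_append_none (rest : List String) (line : String)
    (h : pvCi rest = none) :
    pvCi (rest ++ [line]) = if pvWC line ≤ 5 then some (rest.length : Int) else none := by
  unfold pvCi at *
  rw [PySem.List.enumerate_append, List.find?_append]
  rw [Option.map_eq_none_iff] at h
  rw [h]
  simp [PySem.List.enumerate]

-- every index produced by enumerate rest 0 is below rest.length
theorem pvEnum_idx_lt (rest : List String) (p : Int × String)
    (hp : p ∈ PySem.List.enumerate rest) : 0 ≤ p.1 ∧ p.1 < (rest.length : Int) := by
  rw [PySem.List.mem_enumerate_iff] at hp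
  obtain ⟨k, hk, rfl⟩ := hp
  refine ⟨by simp, by simp; omega⟩

-- description after appending a non-company line
theorem pvDesc_append (rest : List String) (line : String)
    (hsame : pvCi (rest ++ [line]) = pvCi rest) :
    pvDesc (rest ++ [line]) = pvDesc rest ++ line ++ " " := by
  have hne : (decide (some ((rest.length : Int)) ≠ pvCi rest)) = true := by
    cases h : pvCi rest with
    | none => simp
    | some i =>
        obtain ⟨k, hk, rfl, -⟩ := pvCi_some rest i h
        simp; omega
  unfold pvDesc
  rw [hsame, PySem.List.enumerate_append, List.filter_append, List.map_append,
    List.foldl_append]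
  have hne' : (!decide (some ((rest.length : Int)) = pvCi rest)) = true := by simpa using hne
  simp [PySem.List.enumerate, hne']

-- description when the appended line becomes the company
theorem pvDesc_append_company (rest : List String) (line : String)
    (hn : pvCi rest = none) (hnew : pvCi (rest ++ [line]) = some (rest.length : Int)) :
    pvDesc (rest ++ [line]) = pvDesc rest := by
  unfold pvDesc
  rw [hn, hnew, PySem.List.enumerate_append, List.filter_append]
  have h1 : (PySem.List.enumerate rest).filter
      (fun p => decide (some p.1 ≠ some ((rest.length : Int)))) = PySem.List.enumerate rest := by
    rw [List.filter_eq_self]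
    intro p hp
    have := pvEnum_idx_lt rest p hp
    simp; omega
  have h2 : (PySem.List.enumerate rest).filter
      (fun p => decide (some p.1 ≠ (none : Option Int))) = PySem.List.enumerate rest := by
    rw [List.filter_eq_self]; intro p hp; simp
  rw [h1, h2]
  simp [PySem.List.enumerate]

theorem pvRecord_cons (hd : String) (rest : List String) :
    pvRecord (hd :: rest) =
      [("position", hd), ("company", pvCompany rest), ("duration", ""), ("description", pvDesc rest)] := by
  simp [pvRecord]

theorem pvGetD_company (hd : String) (rest : List String) :
    PySem.Dict.getD (PySem.Dict.mk (pvRecord (hd :: rest))) "company" "" = pvCompany rest := by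
  rw [pvRecord_cons]; simp [pysem]

theorem pvGetD_desc (hd : String) (rest : List String) :
    PySem.Dict.getD (PySem.Dict.mk (pvRecord (hd :: rest))) "description" "" = pvDesc rest := by
  rw [pvRecord_cons]; simp [pysem]

theorem pvInsert_company (hd : String) (rest : List String) (v : String) :
    PySem.Dict.insert (PySem.Dict.mk (pvRecord (hd :: rest))) "company" v =
      PySem.Dict.mk [("position", hd), ("company", v), ("duration", ""), ("description", pvDesc rest)] := by
  rw [pvRecord_cons]; apply PySem.Dict.ext; simp [PySem.Dict.items_insert, pysem]

theorem pvInsert_desc (hd : String) (rest : List String) (v : String) :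
    PySem.Dict.insert (PySem.Dict.mk (pvRecord (hd :: rest))) "description" v =
      PySem.Dict.mk [("position", hd), ("company", pvCompany rest), ("duration", ""), ("description", v)] := by
  rw [pvRecord_cons]; apply PySem.Dict.ext; simp [PySem.Dict.items_insert, pysem]

theorem pvCompany_append_some (rest : List String) (line : String) (i : Int)
    (h : pvCi rest = some i) : pvCompany (rest ++ [line]) = pvCompany rest := by
  obtain ⟨k, hk, rfl, hc⟩ := pvCi_some rest i h
  have h2 := pvCi_append_some rest line _ h
  simp [pvCompany, h, h2, PySem.List.pyGetD_natCast, List.getD_eq_getElem?_getD,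
    List.getElem?_append_left hk, hk]

theorem pvCompany_append_new (rest : List String) (line : String)
    (hnew : pvCi (rest ++ [line]) = some (rest.length : Int)) :
    pvCompany (rest ++ [line]) = line := by
  simp [pvCompany, hnew, PySem.List.pyGetD_natCast, List.getD_eq_getElem?_getD]

theorem pv_good_step (bs : List (List String)) (line : String)
    (hbs : pvGood bs) (hl : line ≠ "") : pvGood (pvStepB bs line) := by
  have hnew : ([line] : List String) ≠ [] ∧ ∀ l ∈ [line], l ≠ "" := by
    refine ⟨by simp, ?_⟩; intro l hm; simp at hm; subst hm; exact hl
  rcases List.eq_nil_or_concat bs with rfl | ⟨front, b, rfl⟩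
  · unfold pvStepB
    split_ifs with ht hemp
    · intro c hc; simp at hc; subst hc; exact hnew
    · intro c hc; simp at hc
    · simp at hemp
  · simp only [List.concat_eq_append] at *
    obtain ⟨hbne, hbel⟩ := hbs b (by simp)
    unfold pvStepB
    split_ifs with ht hemp
    · intro c hc
      rcases List.mem_append.mp hc with h | h
      · exact hbs c h
      · simp at h; subst h; exact hnew
    · simp at hemp
    · rw [List.getLast?_concat, List.dropLast_concat]
      intro c hc
      rcases List.mem_append.mp hc with h | h
      · exact hbs c (by simp [h])
      · simp at h; subst h
        refine ⟨by simp [hbne], ?_⟩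
        intro l hm
        rcases List.mem_append.mp hm with h | h
        · exact hbel l h
        · simp at h; subst h; exact hl

theorem pv_step_proj (bs : List (List String)) (line : String)
    (hbs : pvGood bs) :
    pvStepA (pvProj bs) line = pvProj (pvStepB bs line) := by
  rcases List.eq_nil_or_concat bs with rfl | ⟨front, b, rfl⟩
  · by_cases ht : pvIsTitle line
    · show pvStepA ([], PySem.Dict.mk []) line = _
      unfold pvStepA pvStepB pvProj
      simp [ht, pvNewJob_eq]
    · show pvStepA ([], PySem.Dict.mk []) line = _
      unfold pvStepA pvStepB pvProj
      simp [ht]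
  · simp only [List.concat_eq_append] at *
    obtain ⟨hbne, hbel⟩ := hbs b (by simp)
    obtain ⟨hd, rb, rfl⟩ := List.exists_cons_of_ne_nil hbne
    have hproj : pvProj (front ++ [hd :: rb]) =
        (front.map pvRecord, PySem.Dict.mk (pvRecord (hd :: rb))) := by
      unfold pvProj; rw [List.getLast?_concat, List.dropLast_concat]
    by_cases ht : pvIsTitle line
    · -- title line: A flushes current_job, B opens a new block
      rw [hproj]
      unfold pvStepA pvStepB pvProj
      simp only [ht, if_true]
      rw [List.getLast?_concat, List.dropLast_concat]
      simp [pvRecord_cons, pvNewJob_eq]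
    · -- ordinary line: appended to the last block
      rw [hproj]
      unfold pvStepA pvStepB
      have hA : (PySem.Dict.mk (pvRecord (hd :: rb))).items.isEmpty = false := by
        simp [pvRecord_cons]
      have hB : (front ++ [hd :: rb]).isEmpty = false := by simp
      have hproj2 : pvProj (front ++ [hd :: (rb ++ [line])]) =
          (front.map pvRecord, PySem.Dict.mk (pvRecord (hd :: (rb ++ [line])))) := by
        unfold pvProj
        rw [List.getLast?_concat, List.dropLast_concat]
      simp only [ht, Bool.false_eq_true, if_false, hA, hB, List.getLast?_concat,
        List.dropLast_concat, Option.getD_some, List.cons_append]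
      rw [hproj2, pvGetD_company, pvGetD_desc]
      cases hci : pvCi rb with
      | some i =>
          obtain ⟨k, hk, hik, hc⟩ := pvCi_some rb i hci
          have hcne : pvCompany rb ≠ "" := by
            rw [hc]; exact hbel _ (by exact List.mem_cons_of_mem _ (List.getElem_mem hk))
          rw [if_neg (by simp [hcne])]
          rw [pvInsert_desc, pvRecord_cons,
            pvCompany_append_some rb line i hci,
            pvDesc_append rb line (by rw [pvCi_append_some rb line i hci, hci])]
      | none =>
          have hc0 := pvCompany_none rb hci
          by_cases hw : pvWC line ≤ 5
          · rw [if_pos (by simp [hc0, hw])]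
            have hnew : pvCi (rb ++ [line]) = some ((rb.length : Int)) := by
              rw [pvCi_append_none rb line hci, if_pos hw]
            rw [pvInsert_company, pvRecord_cons,
              pvCompany_append_new rb line hnew,
              pvDesc_append_company rb line hci hnew]
          · rw [if_neg (by simp [hw])]
            have hsame : pvCi (rb ++ [line]) = pvCi rb := by
              rw [pvCi_append_none rb line hci, if_neg hw, hci]
            rw [pvInsert_desc, pvRecord_cons,
              pvDesc_append rb line hsame]
            have : pvCompany (rb ++ [line]) = "" := by
              apply pvCompany_none; rw [hsame, hci]
            rw [this, hc0]

theorem pv_fold_proj (lines : List String) (bs : List (List String))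
    (h : ∀ l ∈ lines, l ≠ "") (hbs : pvGood bs) :
    lines.foldl pvStepA (pvProj bs) = pvProj (lines.foldl pvStepB bs) := by
  induction lines generalizing bs with
  | nil => rfl
  | cons x xs ih =>
      simp only [List.foldl_cons]
      rw [pv_step_proj bs x hbs,
        ih _ (fun l hm => h l (by simp [hm])) (pv_good_step bs x hbs (h x (by simp)))]

-- ===== VERDICT (by name: the statement is the Claim_ definition above) =====
theorem parse_work_experience_spec : Claim_equal_parse_work_experience := by
  intro t _
  unfold Spec_parse_work_experience parse_work_experience parse_work_experience_alt
  by_cases ht : (t == "") = true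
  · simp [ht]
  · simp only [ht, Bool.false_eq_true, if_false]
    have hlines : ∀ l ∈ pvCleanLines t, l ≠ "" := by
      intro l hm
      unfold pvCleanLines at hm
      simpa using List.of_mem_filter hm
    have h0 : (([], PySem.Dict.mk []) :
        List (List (String × String)) × PySem.Dict String String) = pvProj [] := rfl
    rw [h0, pv_fold_proj _ _ hlines (by intro b hb; simp at hb)]
    rcases List.eq_nil_or_concat ((pvCleanLines t).foldl pvStepB []) with hnil | ⟨front, b, hcat⟩
    · rw [hnil]; rfl
    · rw [hcat]
      simp only [List.concat_eq_append]
      unfold pvProj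
      rw [List.getLast?_concat, List.dropLast_concat]
      simp [pvRecord]
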